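-- pv_equiv track=rewrite | github.com/paramsinc/all | templates/recommendation-system/data.py | index_users_and_items
-- ===== SOURCE A (Python) =====
-- def index_users_and_items(score_data):
--     """Associates users and items with a unique integer ID."""
--     user_to_id = {}
--     item_to_id = {}
--     user_index = 0
--     item_index = 0
--     for user, scores in score_data.items():
--         if user not in user_to_id:
--             user_to_id[user] = user_index
--             user_index += 1
--         for item, _ in scores:
--             if item not in item_to_id:
--                 item_to_id[item] = item_index
--                 item_index += 1
--     return user_to_id, item_to_id
-- ===== SOURCE B (Python) =====
-- def index_users_and_items(score_data):
--     """Associates users and items with a unique integer ID."""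
--     user_to_id = {u: i for i, u in enumerate(score_data)}
--     flat = [item for scores in score_data.values() for item, _ in scores]
--     first_pos = {item: i for i, item in reversed(list(enumerate(flat)))}
--     items = sorted(first_pos, key=first_pos.get)
--     item_to_id = {it: i for i, it in enumerate(items)}
--     return user_to_id, item_to_id
-- ===== Notes on version B (the rewrite author's own statement) =====
-- stated objective: alternative
-- what changed: Replaces A's single fused pass with membership guards and running counters by a staged sort-based algorithm: users indexed directly by enumerate; item first-occurrence positions computed by an unconditional overwrite pass over the reversed flattened pairs, then the distinct items sorted by that position and enumerated.
import Mathlib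
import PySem

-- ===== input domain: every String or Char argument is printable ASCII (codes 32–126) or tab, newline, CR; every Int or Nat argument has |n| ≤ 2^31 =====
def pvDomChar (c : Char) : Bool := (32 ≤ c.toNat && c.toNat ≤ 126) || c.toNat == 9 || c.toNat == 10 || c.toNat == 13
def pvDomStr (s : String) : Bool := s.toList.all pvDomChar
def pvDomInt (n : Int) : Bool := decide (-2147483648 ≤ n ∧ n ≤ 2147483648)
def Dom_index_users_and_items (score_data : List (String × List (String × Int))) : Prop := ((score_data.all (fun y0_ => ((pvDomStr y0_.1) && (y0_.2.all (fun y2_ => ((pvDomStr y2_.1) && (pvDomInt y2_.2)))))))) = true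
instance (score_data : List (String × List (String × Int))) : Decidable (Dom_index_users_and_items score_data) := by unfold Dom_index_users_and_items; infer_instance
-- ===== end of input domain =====

-- B replaces A's fused single guarded pass with a staged sort-based algorithm: users indexed by
-- enumerate; items' first-occurrence positions computed by a reversed overwrite pass, then the
-- distinct items SORTED by that position and enumerated (alternative decomposition, same results).


-- ===== PORT A =====
def index_users_and_items (score_data : List (String × List (String × Int))) :
    (List (String × Int)) × (List (String × Int)) :=
  -- state: ((user_to_id, user_index), (item_to_id, item_index))
  let r := score_data.foldl
    (fun (s : (PySem.Dict String Int × Int) × (PySem.Dict String Int × Int)) p =>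
      ((if !s.1.1.contains p.1 then (s.1.1.insert p.1 s.1.2, s.1.2 + 1) else s.1),
       (p.2.foldl
         (fun (t : PySem.Dict String Int × Int) q =>
           if !t.1.contains q.1 then (t.1.insert q.1 t.2, t.2 + 1) else t) s.2)))
    ((PySem.Dict.empty, 0), (PySem.Dict.empty, 0))
  (r.1.1.items, r.2.1.items)

-- ===== PORT B =====
def index_users_and_items_alt (score_data : List (String × List (String × Int))) :
    (List (String × Int)) × (List (String × Int)) :=
  let user_to_id := (PySem.List.enumerate (score_data.map Prod.fst) 0).foldl
      (fun (d : PySem.Dict String Int) p => d.insert p.2 (p.1 : Int)) PySem.Dict.empty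
  let flat := score_data.flatMap (fun p => p.2.map Prod.fst)
  let first_pos := (PySem.List.enumerate flat 0).reverse.foldl
      (fun (d : PySem.Dict String Int) p => d.insert p.2 (p.1 : Int)) PySem.Dict.empty
  -- key = first_pos.get; ported as get?.getD 0, exact since every element sorted is a key of first_pos
  let items := PySem.List.sorted first_pos.keys (fun it => (first_pos.get? it).getD 0) false
  let item_to_id := (PySem.List.enumerate items 0).foldl
      (fun (d : PySem.Dict String Int) p => d.insert p.2 (p.1 : Int)) PySem.Dict.empty
  (user_to_id.items, item_to_id.items)

-- ===== PRECONDITION & SPEC =====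
-- score_data models a Python dict, whose keys are necessarily distinct; Pre_ only states that
-- (it excludes no association list that corresponds to an actual Python input of A).
def Pre_index_users_and_items (score_data : List (String × List (String × Int))) : Prop :=
  (score_data.map Prod.fst).Nodup
instance (score_data : List (String × List (String × Int))) : Decidable (Pre_index_users_and_items score_data) := by unfold Pre_index_users_and_items; infer_instance

def pvWitness_index_users_and_items : (List (String × List (String × Int))) :=
  [("a", [("x", 1), ("y", 2)]), ("b", [("x", 3)])]

def Spec_index_users_and_items (score_data : List (String × List (String × Int))) (out : (List (String × Int)) × (List (String × Int))) : Prop := out = index_users_and_items_alt score_data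
instance (score_data : List (String × List (String × Int))) (out : (List (String × Int)) × (List (String × Int))) : Decidable (Spec_index_users_and_items score_data out) := by unfold Spec_index_users_and_items; infer_instance

-- ===== CLAIM (what is proved, stated in full; the proofs are below) =====
def Claim_equal_index_users_and_items : Prop := ∀ (score_data : List (String × List (String × Int))), Dom_index_users_and_items score_data → Pre_index_users_and_items score_data → Spec_index_users_and_items score_data (index_users_and_items score_data)

-- ===== LEMMAS AND PROOFS =====

-- pvG us n = [(us[0], n), (us[1], n+1), …]
def pvG : List String → Int → List (String × Int)
  | [], _ => []
  | x :: t, n => (x, n) :: pvG t (n + 1)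

-- pvFresh seen xs = xs deduplicated from the left, elements of `seen` dropped
def pvFresh : List String → List String → List String
  | _, [] => []
  | seen, x :: t => if x ∈ seen then pvFresh seen t else x :: pvFresh (x :: seen) t

-- pvIdx xs y = index of the first occurrence of y in xs (0 past the end)
def pvIdx : List String → String → Nat
  | [], _ => 0
  | x :: t, y => if x = y then 0 else pvIdx t y + 1

-- first_pos as B builds it, with explicit start index for the recursion
def pvRevD (t : List String) (s : Int) : PySem.Dict String Int :=
  (PySem.List.enumerate t s).reverse.foldl
    (fun (d : PySem.Dict String Int) p => d.insert p.2 (p.1 : Int)) PySem.Dict.empty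

theorem pvFresh_congr : ∀ (xs s s' : List String), (∀ y, y ∈ s ↔ y ∈ s') →
    pvFresh s xs = pvFresh s' xs := by
  intro xs
  induction xs with
  | nil => intro s s' _; rfl
  | cons x t ih =>
    intro s s' h
    simp only [pvFresh]
    by_cases hx : x ∈ s
    · rw [if_pos hx, if_pos ((h x).1 hx)]; exact ih s s' h
    · rw [if_neg hx, if_neg (fun hc => hx ((h x).2 hc))]
      congr 1
      exact ih _ _ (by intro y; simp [h y])

theorem pvFresh_eq_self : ∀ (xs s : List String), xs.Nodup → (∀ x ∈ xs, x ∉ s) →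
    pvFresh s xs = xs := by
  intro xs
  induction xs with
  | nil => intro s _ _; rfl
  | cons x t ih =>
    intro s hnd hdis
    simp only [pvFresh, if_neg (hdis x (by simp))]
    congr 1
    apply ih _ (List.Nodup.of_cons hnd)
    intro y hy
    simp only [List.mem_cons, not_or]
    exact ⟨fun he => (List.nodup_cons.1 hnd).1 (he ▸ hy), hdis y (List.mem_cons_of_mem _ hy)⟩

theorem pvUpdate_eq_fresh : ∀ (xs : List String) (s : PySem.Set String),
    PySem.Set.update s xs = s ++ pvFresh s xs := by
  intro xs
  induction xs with
  | nil => intro s; simp [PySem.Set.update_nil, pvFresh]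
  | cons x t ih =>
    intro s
    rw [PySem.Set.update_cons]
    by_cases hx : x ∈ s
    · rw [PySem.Set.add_of_mem hx, ih s]
      simp [pvFresh, hx]
    · rw [PySem.Set.add_of_not_mem hx, ih (s ++ [x])]
      simp only [pvFresh, if_neg hx]
      rw [pvFresh_congr t (s ++ [x]) (x :: s) (by intro y; simp [or_comm])]
      simp

theorem pvDedup_eq_fresh (xs : List String) : PySem.List.dedup xs = pvFresh [] xs := by
  rw [PySem.List.dedup_eq_ofList, ← PySem.Set.update_nil_left, pvUpdate_eq_fresh]
  simp

theorem pvFresh_mem : ∀ (xs seen : List String) (a : String),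
    a ∈ pvFresh seen xs → a ∈ xs ∧ a ∉ seen := by
  intro xs
  induction xs with
  | nil => intro seen a h; simp [pvFresh] at h
  | cons x t ih =>
    intro seen a h
    simp only [pvFresh] at h
    by_cases hx : x ∈ seen
    · rw [if_pos hx] at h
      obtain ⟨h1, h2⟩ := ih seen a h
      exact ⟨List.mem_cons_of_mem _ h1, h2⟩
    · rw [if_neg hx] at h
      rcases List.mem_cons.1 h with he | hm
      · exact ⟨by simp [he], he ▸ hx⟩
      · obtain ⟨h1, h2⟩ := ih (x :: seen) a hm
        exact ⟨List.mem_cons_of_mem _ h1, fun hc => h2 (List.mem_cons_of_mem _ hc)⟩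

theorem pvFresh_pairwise_idx : ∀ (xs seen : List String),
    (pvFresh seen xs).Pairwise (fun a b => pvIdx xs a < pvIdx xs b) := by
  intro xs
  induction xs with
  | nil => intro seen; simp [pvFresh]
  | cons x t ih =>
    intro seen
    simp only [pvFresh]
    by_cases hx : x ∈ seen
    · rw [if_pos hx]
      refine (ih seen).imp_of_mem ?_
      intro a b ha hb hlt
      have hna : a ≠ x := fun he => (pvFresh_mem t seen a ha).2 (he ▸ hx)
      have hnb : b ≠ x := fun he => (pvFresh_mem t seen b hb).2 (he ▸ hx)
      simp only [pvIdx, if_neg (Ne.symm hna), if_neg (Ne.symm hnb)]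
      omega
    · rw [if_neg hx]
      refine List.Pairwise.cons ?_ ?_
      · intro b hb
        have hnb : b ≠ x := fun he =>
          (pvFresh_mem t (x :: seen) b hb).2 (he ▸ List.mem_cons_self)
        have h1 : pvIdx (x :: t) x = 0 := by simp [pvIdx]
        have h2 : pvIdx (x :: t) b = pvIdx t b + 1 := by simp [pvIdx, Ne.symm hnb]
        omega
      · refine (ih (x :: seen)).imp_of_mem ?_
        intro a b ha hb hlt
        have hna : a ≠ x := fun he =>
          (pvFresh_mem t (x :: seen) a ha).2 (he ▸ List.mem_cons_self)
        have hnb : b ≠ x := fun he =>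
          (pvFresh_mem t (x :: seen) b hb).2 (he ▸ List.mem_cons_self)
        simp only [pvIdx, if_neg (Ne.symm hna), if_neg (Ne.symm hnb)]
        omega

theorem pvRevD_cons (x : String) (t : List String) (s : Int) :
    pvRevD (x :: t) s = (pvRevD t (s + 1)).insert x s := by
  show ((s, x) :: PySem.List.enumerate t (s + 1)).reverse.foldl _ _ = _
  rw [List.reverse_cons, List.foldl_append]
  rfl

theorem pvRevD_get? : ∀ (t : List String) (s : Int) (y : String),
    (pvRevD t s).get? y = if y ∈ t then some (s + (pvIdx t y : Int)) else none := by
  intro t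
  induction t with
  | nil => intro s y; simp [pvRevD, PySem.List.enumerate, PySem.Dict.get?_empty]
  | cons x t ih =>
    intro s y
    rw [pvRevD_cons, PySem.Dict.get?_insert]
    by_cases hxy : y = x
    · subst hxy
      simp [pvIdx]
    · rw [if_neg hxy, ih (s + 1) y]
      by_cases hm : y ∈ t
      · rw [if_pos hm, if_pos (List.mem_cons_of_mem _ hm)]
        congr 1
        have hne : x ≠ y := fun he => hxy he.symm
        simp only [pvIdx, if_neg hne]
        push_cast
        ring
      · rw [if_neg hm, if_neg (by simp [hxy, hm])]

theorem pvRevD_mem_keys (t : List String) (y : String) :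
    y ∈ (pvRevD t 0).keys ↔ y ∈ t := by
  rw [← PySem.Dict.contains_iff_mem_keys, PySem.Dict.contains_eq_isSome_get?, pvRevD_get?]
  by_cases hm : y ∈ t <;> simp [hm]

theorem pvRevD_nodup_keys (t : List String) (s : Int) : (pvRevD t s).keys.Nodup := by
  unfold pvRevD
  exact PySem.Dict.nodup_keys_foldl_insert_key
    (l := (PySem.List.enumerate t s).reverse)
    (key := fun p : Int × String => p.2)
    (f := fun _ p => p.1)
    (d := PySem.Dict.empty) PySem.Dict.nodup_keys_empty

-- A's guarded insert-with-counter loop yields exactly the fresh elements, indexed from n.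
theorem pvLoop_items : ∀ (xs : List String) (d : PySem.Dict String Int) (n : Int),
    (xs.foldl
      (fun (t : PySem.Dict String Int × Int) x =>
        if !t.1.contains x then (t.1.insert x t.2, t.2 + 1) else t) (d, n)).1.items
      = d.items ++ pvG (pvFresh d.keys xs) n := by
  intro xs
  induction xs with
  | nil => intro d n; simp [pvFresh, pvG]
  | cons x t ih =>
    intro d n
    rw [List.foldl_cons]
    by_cases hc : d.contains x = true
    · have hm : x ∈ d.keys := (PySem.Dict.contains_iff_mem_keys d x).1 hc
      simp only [hc, Bool.not_true, Bool.false_eq_true, if_false]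
      rw [ih d n]
      simp [pvFresh, hm]
    · have hc' : d.contains x = false := by simpa using hc
      have hm : x ∉ d.keys := fun hm =>
        hc ((PySem.Dict.contains_iff_mem_keys d x).2 hm)
      simp only [hc', Bool.not_false, if_true]
      rw [ih (d.insert x n) (n + 1)]
      rw [PySem.Dict.items_insert_of_not_contains _ _ hc',
          PySem.Dict.keys_insert_of_not_contains _ _ hc']
      rw [pvFresh_congr t (d.keys ++ [x]) (x :: d.keys) (by intro y; simp [or_comm])]
      simp [pvFresh, hm, pvG]

-- B's enumerate-comprehension written as pvG
theorem pvEnum_map : ∀ (xs : List String) (s : Nat),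
    (PySem.List.enumerate xs s).map (fun p => (p.2, (p.1 : Int))) = pvG xs (s : Int) := by
  intro xs
  induction xs with
  | nil => intro s; rfl
  | cons x t ih =>
    intro s
    show (x, (s : Int)) :: (PySem.List.enumerate t (s + 1)).map (fun p => (p.2, (p.1 : Int)))
        = (x, (s : Int)) :: pvG t ((s : Int) + 1)
    have h := ih (s + 1)
    push_cast at h
    rw [h]

-- B's dict comprehension over a Nodup key list: its items are pvG keys 0
theorem pvComp_items (xs : List String) (hnd : xs.Nodup) :
    ((PySem.List.enumerate xs 0).foldl
      (fun (d : PySem.Dict String Int) p => d.insert p.2 (p.1 : Int)) PySem.Dict.empty).items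
      = pvG xs 0 := by
  have h := PySem.Dict.items_foldl_insert_fresh (l := PySem.List.enumerate xs 0)
      (k := fun p => p.2) (v := fun p => (p.1 : Int)) (d := PySem.Dict.empty)
      (by intro a _; exact PySem.Dict.contains_empty _)
      (by rw [PySem.List.map_snd_enumerate]; exact hnd)
  exact h.trans (pvEnum_map xs 0)

-- B's sorted(first_pos, key=first_pos.get) is exactly the first-occurrence dedup order
theorem pvSorted_keys (flat : List String) :
    PySem.List.sorted (pvRevD flat 0).keys
      (fun it => ((pvRevD flat 0).get? it).getD 0) false = pvFresh [] flat := by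
  have hperm : (pvFresh [] flat).Perm (pvRevD flat 0).keys := by
    rw [List.perm_ext_iff_of_nodup
      (by rw [← pvDedup_eq_fresh]; exact PySem.List.nodup_dedup _)
      (pvRevD_nodup_keys flat 0)]
    intro a
    rw [pvRevD_mem_keys]
    constructor
    · intro h; exact (pvFresh_mem flat [] a h).1
    · intro h
      rw [← pvDedup_eq_fresh, PySem.List.dedup_eq_ofList]
      exact (PySem.Set.mem_ofList _ _).2 h
  refine PySem.List.sorted_eq_of_perm_of_pairwise_lt _ _ _ hperm ?_
  refine (pvFresh_pairwise_idx flat []).imp_of_mem ?_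
  intro a b ha hb hlt
  have hma : a ∈ flat := (pvFresh_mem flat [] a ha).1
  have hmb : b ∈ flat := (pvFresh_mem flat [] b hb).1
  rw [pvRevD_get?, pvRevD_get?, if_pos hma, if_pos hmb]
  simp only [Option.getD_some]
  omega


-- B's whole result, under distinct users
theorem pvAlt_eq (sd : List (String × List (String × Int)))
    (hpre : (sd.map Prod.fst).Nodup) :
    index_users_and_items_alt sd
      = (pvG (sd.map Prod.fst) 0,
         pvG (pvFresh [] (sd.flatMap fun p => p.2.map Prod.fst)) 0) := by
  have hndI : (pvFresh [] (sd.flatMap fun p => p.2.map Prod.fst)).Nodup := by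
    rw [← pvDedup_eq_fresh]; exact PySem.List.nodup_dedup _
  simp only [index_users_and_items_alt]
  refine Prod.ext ?_ ?_
  · exact pvComp_items _ hpre
  · show ((PySem.List.enumerate (PySem.List.sorted (pvRevD _ 0).keys
        (fun it => ((pvRevD _ 0).get? it).getD 0) false) 0).foldl
        (fun (d : PySem.Dict String Int) p => d.insert p.2 (p.1 : Int))
        PySem.Dict.empty).items = _
    rw [pvSorted_keys]
    exact pvComp_items _ hndI

-- ===== VERDICT (by name: the statement is the Claim_ definition above) =====
theorem index_users_and_items_spec : Claim_equal_index_users_and_items := by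
  intro sd _ hpre
  unfold Spec_index_users_and_items index_users_and_items
  rw [pvAlt_eq sd hpre]
  rw [PySem.List.foldl_prod_mk
      (f := fun (a : PySem.Dict String Int × Int) (p : String × List (String × Int)) =>
        if !a.1.contains p.1 then (a.1.insert p.1 a.2, a.2 + 1) else a)
      (g := fun (b : PySem.Dict String Int × Int) (p : String × List (String × Int)) =>
        p.2.foldl (fun (t : PySem.Dict String Int × Int) q =>
          if !t.1.contains q.1 then (t.1.insert q.1 t.2, t.2 + 1) else t) b)]
  refine Prod.ext ?_ ?_
  · -- users
    show (sd.foldl _ (PySem.Dict.empty, 0)).1.items = _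
    rw [show (sd.foldl
        (fun (a : PySem.Dict String Int × Int) (p : String × List (String × Int)) =>
          if !a.1.contains p.1 then (a.1.insert p.1 a.2, a.2 + 1) else a)
        (PySem.Dict.empty, 0))
      = ((sd.map Prod.fst).foldl
        (fun (t : PySem.Dict String Int × Int) x =>
          if !t.1.contains x then (t.1.insert x t.2, t.2 + 1) else t)
        (PySem.Dict.empty, 0)) from (List.foldl_map (f := Prod.fst)
          (g := fun (t : PySem.Dict String Int × Int) (x : String) =>
            if !t.1.contains x then (t.1.insert x t.2, t.2 + 1) else t)).symm]
    rw [pvLoop_items]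
    rw [show ((PySem.Dict.empty : PySem.Dict String Int).items) = [] from rfl,
        show ((PySem.Dict.empty : PySem.Dict String Int).keys) = [] from rfl,
        List.nil_append]
    rw [pvFresh_eq_self _ _ hpre (by simp)]
  · -- items
    show (sd.foldl _ (PySem.Dict.empty, 0)).1.items = _
    rw [show (sd.foldl
        (fun (b : PySem.Dict String Int × Int) (p : String × List (String × Int)) =>
          p.2.foldl (fun (t : PySem.Dict String Int × Int) q =>
            if !t.1.contains q.1 then (t.1.insert q.1 t.2, t.2 + 1) else t) b)
        (PySem.Dict.empty, 0))
      = ((sd.flatMap (fun p => p.2)).foldl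
          (fun (t : PySem.Dict String Int × Int) q =>
            if !t.1.contains q.1 then (t.1.insert q.1 t.2, t.2 + 1) else t)
          (PySem.Dict.empty, 0)) from by
        rw [List.foldl_flatMap]]
    rw [show ((sd.flatMap (fun p => p.2)).foldl
          (fun (t : PySem.Dict String Int × Int) q =>
            if !t.1.contains q.1 then (t.1.insert q.1 t.2, t.2 + 1) else t)
          (PySem.Dict.empty, 0))
      = (((sd.flatMap (fun p => p.2)).map Prod.fst).foldl
          (fun (t : PySem.Dict String Int × Int) x =>
            if !t.1.contains x then (t.1.insert x t.2, t.2 + 1) else t)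
          (PySem.Dict.empty, 0)) from (List.foldl_map (f := (Prod.fst : String × Int → String))
          (g := fun (t : PySem.Dict String Int × Int) (x : String) =>
            if !t.1.contains x then (t.1.insert x t.2, t.2 + 1) else t)).symm]
    rw [pvLoop_items]
    rw [show ((PySem.Dict.empty : PySem.Dict String Int).items) = [] from rfl,
        show ((PySem.Dict.empty : PySem.Dict String Int).keys) = [] from rfl,
        List.nil_append]
    rw [show (sd.flatMap (fun p => p.2)).map Prod.fst
        = sd.flatMap (fun p => p.2.map Prod.fst) from by simp [List.map_flatMap]]
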